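-- pv_equiv track=rewrite | github.com/MrBrantCode/unitest_baseline | mut_generate/mist_train_taco/taco_11006/solution.py | count_and_sort_names
-- ===== SOURCE A (Python) =====
-- def count_and_sort_names(names):
--     # Sort the names alphabetically
--     sorted_names = sorted(names)
--
--     # Initialize the result list
--     result = []
--
--     # Iterate through the sorted names and count their frequencies
--     for name in sorted_names:
--         if not result or result[-1][0] != name:
--             # If the name is not in the result list, add it with frequency 1
--             result.append((name, 1))
--         else:
--             # If the name is already in the result list, increment its frequency
--             result[-1] = (name, result[-1][1] + 1)
--
--     return result
-- ===== SOURCE B (Python) =====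
-- def count_and_sort_names(names):
--     # Count with a hash map in one unsorted pass, then sort only the
--     # distinct names at the end.
--     counts = {}
--     for name in names:
--         counts[name] = counts.get(name, 0) + 1
--     return sorted(counts.items(), key=lambda item: item[0])
-- ===== Notes on version B (the rewrite author's own statement) =====
-- stated objective: alternative
-- what changed: B replaces A's sort-then-group-consecutive pass by a one-pass hash-map frequency count followed by a sort of only the distinct names.
import Mathlib
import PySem

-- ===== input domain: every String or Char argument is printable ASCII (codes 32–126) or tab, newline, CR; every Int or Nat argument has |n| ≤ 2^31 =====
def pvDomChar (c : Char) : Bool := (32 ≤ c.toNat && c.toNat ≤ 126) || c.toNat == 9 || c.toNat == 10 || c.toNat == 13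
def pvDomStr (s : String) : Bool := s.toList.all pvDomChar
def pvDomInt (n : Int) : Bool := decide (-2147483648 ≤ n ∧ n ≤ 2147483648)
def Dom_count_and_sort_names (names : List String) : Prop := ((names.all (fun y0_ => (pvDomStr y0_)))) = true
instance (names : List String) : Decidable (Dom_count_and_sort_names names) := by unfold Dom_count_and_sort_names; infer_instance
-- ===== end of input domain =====

-- B counts with a hash map in one unsorted pass and sorts only the distinct
-- names at the end, instead of A's sort-everything-then-group-consecutive pass.

-- ===== PORT A =====
-- the body of A's for-loop: 'if not result or result[-1][0] != name: append (name,1)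
-- else: result[-1] = (name, result[-1][1] + 1)'
def pvStepA (result : List (String × Int)) (name : String) : List (String × Int) :=
  match PySem.List.pyGet? result (-1) with
  | none => result ++ [(name, 1)]                         -- 'not result' branch
  | some last =>
    if last.1 ≠ name then result ++ [(name, 1)]
    else result.dropLast ++ [(name, last.2 + 1)]          -- result[-1] = (name, last[1]+1)

def count_and_sort_names (names : List String) : List (String × Int) :=
  let sorted_names := PySem.List.sorted names (fun x => x) false
  sorted_names.foldl pvStepA []

-- ===== PORT B =====
def count_and_sort_names_alt (names : List String) : List (String × Int) :=
  let counts := names.foldl (fun d name => d.insert name (d.getD name 0 + 1)) PySem.Dict.empty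
  PySem.List.sorted counts.items (fun item => item.1) false

-- ===== PRECONDITION & SPEC =====
def Spec_count_and_sort_names (names : List String) (out : List (String × Int)) : Prop := out = count_and_sort_names_alt names
instance (names : List String) (out : List (String × Int)) : Decidable (Spec_count_and_sort_names names out) := by unfold Spec_count_and_sort_names; infer_instance

-- ===== CLAIM (what is proved, stated in full; the proofs are below) =====
def Claim_equal_count_and_sort_names : Prop := ∀ (names : List String), Dom_count_and_sort_names names → Spec_count_and_sort_names names (count_and_sort_names names)

-- ===== LEMMAS AND PROOFS =====

-- ofList (first-occurrence dedup) commutes with filter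
theorem pv_ofList_filter (p : String → Bool) (t : List String) :
    PySem.Set.ofList (t.filter p) = (PySem.Set.ofList t).filter p := by
  induction t with
  | nil => simp [PySem.Set.ofList_nil]
  | cons x t ih =>
    by_cases hp : p x = true
    · simp only [List.filter_cons, hp, if_pos, PySem.Set.ofList_cons, ih,
        PySem.Set.discard, List.filter_filter]
      refine congrArg (x :: ·) (List.filter_congr ?_)
      intro y _
      by_cases hxy : y = x <;> simp [hxy, hp, Bool.and_comm]
    · simp only [List.filter_cons, hp, Bool.false_eq_true, if_neg, not_false_iff,
        PySem.Set.ofList_cons, ih, PySem.Set.discard, List.filter_filter]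
      rw [List.filter_congr]
      intro y _
      by_cases hxy : y = x
      · subst hxy; simp [hp]
      · simp [hxy]

theorem pv_ofList_sublist (t : List String) : (PySem.Set.ofList t).Sublist t := by
  induction t with
  | nil => simp [PySem.Set.ofList_nil]
  | cons x t ih =>
    rw [PySem.Set.ofList_cons]
    exact List.Sublist.cons₂ x ((List.filter_sublist).trans ih)

-- the main loop invariant for A: processing a sorted tail s after the accumulator
-- ends in the open group (x, c)
theorem pv_foldA (s : List String) : ∀ (x : String) (c : Int) (acc : List (String × Int)),
    (x :: s).Pairwise (· ≤ ·) →
    s.foldl pvStepA (acc ++ [(x, c)])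
      = acc ++ (x, c + (s.count x : Int)) ::
          (PySem.Set.ofList (s.filter (fun y => y ≠ x))).map
            (fun k => (k, (s.count k : Int))) := by
  induction s with
  | nil => intro x c acc _; simp [PySem.Set.ofList_nil]
  | cons y t ih =>
    intro x c acc hp
    have hxy : x ≤ y := (List.pairwise_cons.1 hp).1 y (by simp)
    have hxt : ∀ z ∈ t, x ≤ z := fun z hz => (List.pairwise_cons.1 hp).1 z (by simp [hz])
    have hyt : (y :: t).Pairwise (· ≤ ·) := (List.pairwise_cons.1 hp).2
    have hlast : PySem.List.pyGet? (acc ++ [(x, c)]) (-1) = some (x, c) := by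
      simp [PySem.List.pyGet?, PySem.List.pyIdx?]
    by_cases hxe : x = y
    · -- run continues: same name again
      subst hxe
      have hxt' : (x :: t).Pairwise (· ≤ ·) := List.pairwise_cons.2 ⟨hxt, hyt.tail⟩
      have step : pvStepA (acc ++ [(x, c)]) x = acc ++ [(x, c + 1)] := by
        simp [pvStepA, hlast]
      rw [List.foldl_cons, step, ih x (c + 1) acc hxt']
      refine congrArg (acc ++ ·) ?_
      have hf : (x :: t).filter (fun y => decide (y ≠ x)) = t.filter (fun y => decide (y ≠ x)) := by
        simp
      rw [hf]
      refine congrArg₂ (· :: ·) ?_ (List.map_congr_left ?_)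
      · simp; ring
      · intro k hk
        have hk' : k ∈ t.filter (fun y => decide (y ≠ x)) := by
          simpa [PySem.Set.mem_ofList] using hk
        have hkx : k ≠ x := by
          have := List.of_mem_filter hk'; simpa using this
        simp [Ne.symm hkx]
    · -- new name: y starts a fresh group
      have hxy' : x < y := lt_of_le_of_ne hxy hxe
      have hxnot : x ∉ y :: t := by
        intro hmem
        rcases List.mem_cons.1 hmem with h | h
        · exact hxe h
        · exact absurd hxy' (not_lt.2 ((List.pairwise_cons.1 hyt).1 x h))
      have step : pvStepA (acc ++ [(x, c)]) y = (acc ++ [(x, c)]) ++ [(y, 1)] := by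
        have : (x, c).1 ≠ y := hxe
        simp [pvStepA, hlast, this]
      rw [List.foldl_cons, step, ih y 1 (acc ++ [(x, c)]) hyt]
      have hcx : (y :: t).count x = 0 := List.count_eq_zero.2 hxnot
      have hfx : (y :: t).filter (fun z => decide (z ≠ x)) = y :: t := by
        apply List.filter_eq_self.2
        intro z hz
        simp only [decide_eq_true_eq]
        intro he; exact hxnot (he ▸ hz)
      rw [List.append_assoc]
      refine congrArg (acc ++ ·) ?_
      rw [hfx, hcx, PySem.Set.ofList_cons]
      simp only [List.cons_append, List.nil_append, List.map_cons]
      refine congrArg₂ (· :: ·) (by simp) ?_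
      refine congrArg₂ (· :: ·) (by simp; ring) ?_
      have hdis : (PySem.Set.ofList t).discard y
          = PySem.Set.ofList (t.filter (fun z => decide (z ≠ y))) := by
        rw [pv_ofList_filter]
        simp [PySem.Set.discard]
        rw [List.filter_congr]
        intro z _
        exact Bool.eq_iff_iff.2 (by simp)
      rw [hdis]
      apply List.map_congr_left
      intro k hk
      have hk' : k ∈ t.filter (fun z => decide (z ≠ y)) := by
        simpa [PySem.Set.mem_ofList] using hk
      have hky : k ≠ y := by have := List.of_mem_filter hk'; simpa using this
      simp [Ne.symm hky]

-- A on any input computes the run-length encoding of sorted names,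
-- i.e. the map over the deduped sorted list
theorem pv_A_char (names : List String) :
    count_and_sort_names names
      = (PySem.Set.ofList (PySem.List.sorted names (fun x => x) false)).map
          (fun k => (k, ((PySem.List.sorted names (fun x => x) false).count k : Int))) := by
  unfold count_and_sort_names
  cases hs : PySem.List.sorted names (fun x => x) false with
  | nil => simp [PySem.Set.ofList_nil]
  | cons x s =>
    have hp : (x :: s).Pairwise (· ≤ ·) := by
      have := PySem.List.sorted_pairwise (xs := names) (key := fun x => x)
      rw [hs] at this; exact this
    have step0 : pvStepA [] x = [] ++ [(x, 1)] := by
      simp [pvStepA, PySem.List.pyGet?, PySem.List.pyIdx?]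
    rw [List.foldl_cons, step0, pv_foldA s x 1 [] hp]
    rw [PySem.Set.ofList_cons]
    simp only [List.nil_append, List.map_cons]
    refine congrArg₂ (· :: ·) (by simp; ring) ?_
    have hdis : (PySem.Set.ofList s).discard x
        = PySem.Set.ofList (s.filter (fun z => decide (z ≠ x))) := by
      rw [pv_ofList_filter]
      simp [PySem.Set.discard]
      rw [List.filter_congr]
      intro z _
      exact Bool.eq_iff_iff.2 (by simp)
    rw [hdis]
    apply List.map_congr_left
    intro k hk
    have hk' : k ∈ s.filter (fun z => decide (z ≠ x)) := by
      simpa [PySem.Set.mem_ofList] using hk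
    have hkx : k ≠ x := by have := List.of_mem_filter hk'; simpa using this
    simp [Ne.symm hkx]

-- dedup of the sorted list = sorted dedup
theorem pv_ofList_sorted (names : List String) :
    PySem.Set.ofList (PySem.List.sorted names (fun x => x) false)
      = PySem.List.sorted (PySem.Set.ofList names) (fun x => x) false := by
  symm
  apply PySem.List.sorted_id_eq_of_perm_of_pairwise
  · refine (List.perm_ext_iff_of_nodup (PySem.Set.nodup_ofList _) (PySem.Set.nodup_ofList _)).2 ?_
    intro a
    rw [PySem.Set.mem_ofList, PySem.Set.mem_ofList]
    exact (PySem.List.sorted_perm names (fun x => x) false).mem_iff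
  · exact List.Pairwise.sublist (pv_ofList_sublist _) (PySem.List.sorted_pairwise names (fun x => x))

-- B computes the same map: its dict is Counter(names), whose items, sorted by key,
-- are the sorted distinct names paired with their counts
theorem pv_B_char (names : List String) :
    count_and_sort_names_alt names
      = (PySem.List.sorted (PySem.Set.ofList names) (fun x => x) false).map
          (fun k => (k, (names.count k : Int))) := by
  rw [show count_and_sort_names_alt names
        = PySem.List.sorted (PySem.Dict.counter names).items (fun item => item.1) false from rfl,
      PySem.Dict.items_counter]
  apply PySem.List.sorted_eq_of_perm_of_pairwise_lt
  · exact ((PySem.List.sorted_perm (PySem.Set.ofList names) (fun x => x) false).map _)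
  · rw [List.pairwise_map]
    exact PySem.List.sorted_ofList_pairwise_lt names

-- ===== VERDICT (by name: the statement is the Claim_ definition above) =====
theorem count_and_sort_names_spec : Claim_equal_count_and_sort_names := by
  intro names _
  show count_and_sort_names names = count_and_sort_names_alt names
  rw [pv_A_char, pv_B_char, pv_ofList_sorted]
  apply List.map_congr_left
  intro k _
  have := (PySem.List.sorted_perm names (fun x => x) false).count_eq k
  simp [this]
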